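-- pv_equiv track=rewrite | github.com/ckoons/Tekton | Hephaestus/ui_dev_tools/tools/comparator.py | _categorize_dynamic_tags
-- ===== SOURCE A (Python) =====
-- from typing import Dict, Any, List, Set, Tuple
--
-- def _categorize_dynamic_tags(dynamic_tags: List[str]) -> Dict[str, List[str]]:
--     """Categorize dynamic tags by their likely purpose"""
--     categories = {
--         "navigation": [],
--         "loading": [],
--         "state": [],
--         "list": [],
--         "unknown": []
--     }
--
--     for tag in dynamic_tags:
--         if 'nav' in tag or 'navigation' in tag:
--             categories["navigation"].append(tag)
--         elif 'loading' in tag or 'loader' in tag: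
--             categories["loading"].append(tag)
--         elif 'state' in tag or 'status' in tag:
--             categories["state"].append(tag)
--         elif 'list' in tag:
--             categories["list"].append(tag)
--         else:
--             categories["unknown"].append(tag)
--
--     return categories
-- ===== SOURCE B (Python) =====
-- from typing import Dict, List
--
-- _RULES = [
--     ("navigation", ["nav", "navigation"]),
--     ("loading", ["loading", "loader"]),
--     ("state", ["state", "status"]),
--     ("list", ["list"]),
-- ]
--
-- def _bucket(tag: str) -> str:
--     for name, keywords in _RULES:
--         if any(kw in tag for kw in keywords):
--             return name
--     return "unknown"
--
-- def _categorize_dynamic_tags(dynamic_tags: List[str]) -> Dict[str, List[str]]: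
--     names = [name for name, _ in _RULES] + ["unknown"]
--     return {name: [t for t in dynamic_tags if _bucket(t) == name] for name in names}
-- ===== Notes on version B (the rewrite author's own statement) =====
-- stated objective: idiomatic
-- what changed: Replaces the single-pass elif cascade that appends into a mutable dict with a data-driven rule table: a _bucket helper returns the first matching category name and the result is built as a dict comprehension filtering the tag list once per category.
import Mathlib
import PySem

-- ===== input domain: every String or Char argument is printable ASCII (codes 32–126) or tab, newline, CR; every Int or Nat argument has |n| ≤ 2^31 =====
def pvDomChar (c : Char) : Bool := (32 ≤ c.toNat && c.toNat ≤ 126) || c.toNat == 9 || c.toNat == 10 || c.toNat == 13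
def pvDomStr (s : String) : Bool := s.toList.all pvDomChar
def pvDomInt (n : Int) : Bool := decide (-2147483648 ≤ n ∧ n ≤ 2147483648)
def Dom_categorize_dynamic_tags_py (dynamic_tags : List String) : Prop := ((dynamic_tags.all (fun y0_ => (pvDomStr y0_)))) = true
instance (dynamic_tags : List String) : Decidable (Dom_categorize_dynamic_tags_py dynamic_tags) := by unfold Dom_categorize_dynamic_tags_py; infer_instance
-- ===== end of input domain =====

-- B replaces A's elif cascade appending into a dict with a rule table: a bucket
-- function returning the first matching category, and one filter pass per category.

-- ===== PORT A =====
-- the initial dict {navigation: [], loading: [], state: [], list: [], unknown: []}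
def pvInitA : PySem.Dict String (List String) :=
  PySem.Dict.ofList [("navigation", []), ("loading", []), ("state", []), ("list", []), ("unknown", [])]

def categorize_dynamic_tags_py (dynamic_tags : List String) : List (String × List String) :=
  (dynamic_tags.foldl (fun categories tag =>
    if PySem.Str.isIn "nav" tag || PySem.Str.isIn "navigation" tag then
      categories.modify "navigation" [] (· ++ [tag])
    else if PySem.Str.isIn "loading" tag || PySem.Str.isIn "loader" tag then
      categories.modify "loading" [] (· ++ [tag])
    else if PySem.Str.isIn "state" tag || PySem.Str.isIn "status" tag then
      categories.modify "state" [] (· ++ [tag])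
    else if PySem.Str.isIn "list" tag then
      categories.modify "list" [] (· ++ [tag])
    else
      categories.modify "unknown" [] (· ++ [tag])) pvInitA).items

-- ===== PORT B =====
def pvRules : List (String × List String) :=
  [("navigation", ["nav", "navigation"]),
   ("loading", ["loading", "loader"]),
   ("state", ["state", "status"]),
   ("list", ["list"])]

def pvBucket (tag : String) : String :=
  match pvRules.find? (fun r => r.2.any (fun kw => PySem.Str.isIn kw tag)) with
  | some r => r.1
  | none => "unknown"

def categorize_dynamic_tags_py_alt (dynamic_tags : List String) : List (String × List String) :=
  (pvRules.map Prod.fst ++ ["unknown"]).map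
    (fun name => (name, dynamic_tags.filter (fun t => pvBucket t == name)))

-- ===== PRECONDITION & SPEC =====
def Spec_categorize_dynamic_tags_py (dynamic_tags : List String) (out : List (String × List String)) : Prop := out = categorize_dynamic_tags_py_alt dynamic_tags
instance (dynamic_tags : List String) (out : List (String × List String)) : Decidable (Spec_categorize_dynamic_tags_py dynamic_tags out) := by unfold Spec_categorize_dynamic_tags_py; infer_instance

-- ===== CLAIM (what is proved, stated in full; the proofs are below) =====
def Claim_equal_categorize_dynamic_tags_py : Prop := ∀ (dynamic_tags : List String), Dom_categorize_dynamic_tags_py dynamic_tags → Spec_categorize_dynamic_tags_py dynamic_tags (categorize_dynamic_tags_py dynamic_tags)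

-- ===== LEMMAS AND PROOFS =====

lemma pv_fold_items (tags : List String) (a b c d e : List String) :
    (tags.foldl (fun categories tag =>
      if PySem.Str.isIn "nav" tag || PySem.Str.isIn "navigation" tag then
        categories.modify "navigation" [] (· ++ [tag])
      else if PySem.Str.isIn "loading" tag || PySem.Str.isIn "loader" tag then
        categories.modify "loading" [] (· ++ [tag])
      else if PySem.Str.isIn "state" tag || PySem.Str.isIn "status" tag then
        categories.modify "state" [] (· ++ [tag])
      else if PySem.Str.isIn "list" tag then
        categories.modify "list" [] (· ++ [tag])
      else
        categories.modify "unknown" [] (· ++ [tag]))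
      (PySem.Dict.mk [("navigation", a), ("loading", b), ("state", c), ("list", d), ("unknown", e)])).items
    = [("navigation", a ++ tags.filter (fun t => pvBucket t == "navigation")),
       ("loading",    b ++ tags.filter (fun t => pvBucket t == "loading")),
       ("state",      c ++ tags.filter (fun t => pvBucket t == "state")),
       ("list",       d ++ tags.filter (fun t => pvBucket t == "list")),
       ("unknown",    e ++ tags.filter (fun t => pvBucket t == "unknown"))] := by
  induction tags generalizing a b c d e with
  | nil => simp
  | cons t ts ih =>
    simp only [List.foldl_cons, List.filter_cons]
    by_cases h1 : (PySem.Str.isIn "nav" t || PySem.Str.isIn "navigation" t) = true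
    · rw [if_pos h1]
      have hb : pvBucket t = "navigation" := by
        unfold pvBucket pvRules
        rw [List.find?_cons_of_pos (by simp only [List.any_cons, List.any_nil, Bool.or_false]; exact h1)]
      rw [show (PySem.Dict.mk [("navigation", a), ("loading", b), ("state", c), ("list", d), ("unknown", e)]).modify "navigation" [] (· ++ [t]) = PySem.Dict.mk [("navigation", (a ++ [t])), ("loading", b), ("state", c), ("list", d), ("unknown", e)] from by
        simp [PySem.Dict.modify, PySem.Dict.insert, PySem.Dict.getD, PySem.Dict.get?, PySem.Dict.contains]]
      rw [ih]
      simp [hb]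
    · rw [if_neg h1]
      simp only [Bool.not_eq_true] at h1
      by_cases h2 : (PySem.Str.isIn "loading" t || PySem.Str.isIn "loader" t) = true
      · rw [if_pos h2]
        have hb : pvBucket t = "loading" := by
          unfold pvBucket pvRules
          rw [List.find?_cons_of_neg (by simp only [List.any_cons, List.any_nil, Bool.or_false, Bool.not_eq_true]; exact h1), List.find?_cons_of_pos (by simp only [List.any_cons, List.any_nil, Bool.or_false]; exact h2)]
        rw [show (PySem.Dict.mk [("navigation", a), ("loading", b), ("state", c), ("list", d), ("unknown", e)]).modify "loading" [] (· ++ [t]) = PySem.Dict.mk [("navigation", a), ("loading", (b ++ [t])), ("state", c), ("list", d), ("unknown", e)] from by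
          simp [PySem.Dict.modify, PySem.Dict.insert, PySem.Dict.getD, PySem.Dict.get?, PySem.Dict.contains]]
        rw [ih]
        simp [hb]
      · rw [if_neg h2]
        simp only [Bool.not_eq_true] at h2
        by_cases h3 : (PySem.Str.isIn "state" t || PySem.Str.isIn "status" t) = true
        · rw [if_pos h3]
          have hb : pvBucket t = "state" := by
            unfold pvBucket pvRules
            rw [List.find?_cons_of_neg (by simp only [List.any_cons, List.any_nil, Bool.or_false, Bool.not_eq_true]; exact h1), List.find?_cons_of_neg (by simp only [List.any_cons, List.any_nil, Bool.or_false, Bool.not_eq_true]; exact h2), List.find?_cons_of_pos (by simp only [List.any_cons, List.any_nil, Bool.or_false]; exact h3)]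
          rw [show (PySem.Dict.mk [("navigation", a), ("loading", b), ("state", c), ("list", d), ("unknown", e)]).modify "state" [] (· ++ [t]) = PySem.Dict.mk [("navigation", a), ("loading", b), ("state", (c ++ [t])), ("list", d), ("unknown", e)] from by
            simp [PySem.Dict.modify, PySem.Dict.insert, PySem.Dict.getD, PySem.Dict.get?, PySem.Dict.contains]]
          rw [ih]
          simp [hb]
        · rw [if_neg h3]
          simp only [Bool.not_eq_true] at h3
          by_cases h4 : (PySem.Str.isIn "list" t) = true
          · rw [if_pos h4]
            have hb : pvBucket t = "list" := by
              unfold pvBucket pvRules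
              rw [List.find?_cons_of_neg (by simp only [List.any_cons, List.any_nil, Bool.or_false, Bool.not_eq_true]; exact h1), List.find?_cons_of_neg (by simp only [List.any_cons, List.any_nil, Bool.or_false, Bool.not_eq_true]; exact h2), List.find?_cons_of_neg (by simp only [List.any_cons, List.any_nil, Bool.or_false, Bool.not_eq_true]; exact h3), List.find?_cons_of_pos (by simp only [List.any_cons, List.any_nil, Bool.or_false]; exact h4)]
            rw [show (PySem.Dict.mk [("navigation", a), ("loading", b), ("state", c), ("list", d), ("unknown", e)]).modify "list" [] (· ++ [t]) = PySem.Dict.mk [("navigation", a), ("loading", b), ("state", c), ("list", (d ++ [t])), ("unknown", e)] from by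
              simp [PySem.Dict.modify, PySem.Dict.insert, PySem.Dict.getD, PySem.Dict.get?, PySem.Dict.contains]]
            rw [ih]
            simp [hb]
          · rw [if_neg h4]
            simp only [Bool.not_eq_true] at h4
            have hb : pvBucket t = "unknown" := by
              unfold pvBucket pvRules
              rw [List.find?_cons_of_neg (by simp only [List.any_cons, List.any_nil, Bool.or_false, Bool.not_eq_true]; exact h1), List.find?_cons_of_neg (by simp only [List.any_cons, List.any_nil, Bool.or_false, Bool.not_eq_true]; exact h2), List.find?_cons_of_neg (by simp only [List.any_cons, List.any_nil, Bool.or_false, Bool.not_eq_true]; exact h3), List.find?_cons_of_neg (by simp only [List.any_cons, List.any_nil, Bool.or_false, Bool.not_eq_true]; exact h4)]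
              rfl
            rw [show (PySem.Dict.mk [("navigation", a), ("loading", b), ("state", c), ("list", d), ("unknown", e)]).modify "unknown" [] (· ++ [t]) = PySem.Dict.mk [("navigation", a), ("loading", b), ("state", c), ("list", d), ("unknown", (e ++ [t]))] from by
              simp [PySem.Dict.modify, PySem.Dict.insert, PySem.Dict.getD, PySem.Dict.get?, PySem.Dict.contains]]
            rw [ih]
            simp [hb]

-- ===== VERDICT (by name: the statement is the Claim_ definition above) =====
theorem categorize_dynamic_tags_py_spec : Claim_equal_categorize_dynamic_tags_py := by
  intro tags _
  unfold Spec_categorize_dynamic_tags_py categorize_dynamic_tags_py categorize_dynamic_tags_py_alt pvInitA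
  rw [show PySem.Dict.ofList [("navigation", ([] : List String)), ("loading", []), ("state", []), ("list", []), ("unknown", [])] = PySem.Dict.mk [("navigation", []), ("loading", []), ("state", []), ("list", []), ("unknown", [])] from rfl]
  rw [pv_fold_items]
  simp [pvRules]
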